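-- pv_equiv track=rewrite | github.com/lucianadmacedo/PARLAMINT-ES-MC | bin/ana_fix_after_bugs.py | separate_meta
-- ===== SOURCE A (Python) =====
-- def separate_meta(text):
--     text = text.split('\n')
--     metadata = []
--     data = []
--     meta = 0
--     for i in text:
--         if '<body>' in i:
--             meta += 1
--         if meta == 0:
--             metadata.append(i)
--         else:
--             data.append(i)
--     return ('\n'.join(metadata), '\n'.join(data))
-- ===== SOURCE B (Python) =====
-- def separate_meta(text):
--     pos = text.find('<body>')
--     if pos == -1:
--         return (text, '')
--     cut = text.rfind('\n', 0, pos)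
--     if cut == -1:
--         return ('', text)
--     return (text[:cut], text[cut + 1:])
-- ===== Notes on version B (the rewrite author's own statement) =====
-- stated objective: alternative
-- what changed: B never splits the text into lines: it locates the first occurrence of '<body>' in the whole string with str.find, then finds the last newline before it with str.rfind and cuts the string there, instead of A's line-by-line pass appending each line to one of two lists under a running flag.
import Mathlib
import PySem

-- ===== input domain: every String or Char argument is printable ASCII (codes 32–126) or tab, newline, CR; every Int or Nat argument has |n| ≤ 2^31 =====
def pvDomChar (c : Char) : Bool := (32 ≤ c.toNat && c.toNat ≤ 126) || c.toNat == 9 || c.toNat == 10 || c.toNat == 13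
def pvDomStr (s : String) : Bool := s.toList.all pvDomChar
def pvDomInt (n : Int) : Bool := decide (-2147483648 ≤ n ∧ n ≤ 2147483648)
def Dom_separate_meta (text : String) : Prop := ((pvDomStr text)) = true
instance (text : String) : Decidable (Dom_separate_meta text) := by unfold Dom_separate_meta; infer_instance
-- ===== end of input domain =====

-- B works on the whole string with find/rfind instead of splitting into lines; objective: alternative
-- algorithm (no line list is ever built), same asymptotic cost.

-- ===== PORT A =====
-- loop body of A: state = (metadata, data, meta counter)
def sepMetaStep (s : List (List Char) × List (List Char) × Int) (i : List Char) :
    List (List Char) × List (List Char) × Int :=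
  let m := if PySem.Chars.isIn "<body>".toList i then s.2.2 + 1 else s.2.2
  if m == 0 then (s.1 ++ [i], s.2.1, m) else (s.1, s.2.1 ++ [i], m)

def separate_meta (text : String) : String × String :=
  let lines := PySem.Chars.splitOn text.toList "\n".toList
  let st := lines.foldl sepMetaStep ([], [], 0)
  (String.ofList (PySem.Chars.join "\n".toList st.1), String.ofList (PySem.Chars.join "\n".toList st.2.1))

-- ===== PORT B =====
def separate_meta_alt (text : String) : String × String :=
  let pos := PySem.Str.find text "<body>"
  if pos == -1 then (text, "")
  else
    let cut := PySem.Str.rfindFrom text "\n" 0 (some pos)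
    if cut == -1 then ("", text)
    else (PySem.Str.slice text none (some cut), PySem.Str.slice text (some (cut + 1)) none)

-- ===== PRECONDITION & SPEC =====
def Spec_separate_meta (text : String) (out : String × String) : Prop := out = separate_meta_alt text
instance (text : String) (out : String × String) : Decidable (Spec_separate_meta text out) := by unfold Spec_separate_meta; infer_instance

-- ===== CLAIM (what is proved, stated in full; the proofs are below) =====
def Claim_equal_separate_meta : Prop := ∀ (text : String), Dom_separate_meta text → Spec_separate_meta text (separate_meta text)

-- ===== LEMMAS AND PROOFS =====

-- ---- A-side: the fold splits the line list at the first line containing '<body>' ----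
theorem sepMetaStep_pos (a b : List (List Char)) (m : Int) (hm : 0 < m) (x : List Char) :
    sepMetaStep (a, b, m) x = (a, b ++ [x], if PySem.Chars.isIn "<body>".toList x then m + 1 else m) := by
  simp only [sepMetaStep]
  split <;> rw [if_neg (by simp; omega)]

theorem sepMetaStep_zero_pos (a b : List (List Char)) (x : List Char) (h : PySem.Chars.isIn "<body>".toList x = true) :
    sepMetaStep (a, b, 0) x = (a, b ++ [x], 1) := by
  simp only [sepMetaStep, h, if_true]
  rw [if_neg (by simp)]; norm_num

theorem sepMetaStep_zero_neg (a b : List (List Char)) (x : List Char) (h : ¬ PySem.Chars.isIn "<body>".toList x = true) :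
    sepMetaStep (a, b, 0) x = (a ++ [x], b, 0) := by
  simp only [sepMetaStep, eq_false_of_ne_true h]
  rw [if_pos (by simp)]; norm_num

theorem sepMeta_loop_pos (lines : List (List Char)) (a b : List (List Char)) (m : Int) (hm : 0 < m) :
    (lines.foldl sepMetaStep (a, b, m)).1 = a ∧ (lines.foldl sepMetaStep (a, b, m)).2.1 = b ++ lines := by
  induction lines generalizing b m with
  | nil => simp
  | cons x xs ih =>
    rw [List.foldl_cons, sepMetaStep_pos a b m hm x]
    rcases ih (b ++ [x]) (if PySem.Chars.isIn "<body>".toList x then m + 1 else m) (by split <;> omega) with ⟨h1, h2⟩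
    exact ⟨h1, h2.trans (by simp)⟩

theorem sepMeta_loop_zero (lines : List (List Char)) (a b : List (List Char)) :
    (lines.foldl sepMetaStep (a, b, 0)).1 = a ++ lines.take (lines.findIdx (fun l => PySem.Chars.isIn "<body>".toList l)) ∧
    (lines.foldl sepMetaStep (a, b, 0)).2.1 = b ++ lines.drop (lines.findIdx (fun l => PySem.Chars.isIn "<body>".toList l)) := by
  induction lines generalizing a b with
  | nil => simp
  | cons x xs ih =>
    rw [List.foldl_cons]
    by_cases h : PySem.Chars.isIn "<body>".toList x = true
    · rw [sepMetaStep_zero_pos a b x h, List.findIdx_cons, h]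
      rcases sepMeta_loop_pos xs a (b ++ [x]) 1 (by omega) with ⟨h1, h2⟩
      simp [h1, h2]
    · rw [sepMetaStep_zero_neg a b x h, List.findIdx_cons, eq_false_of_ne_true h]
      rcases ih (a ++ [x]) b with ⟨h1, h2⟩
      simp [h1, h2]

-- ---- splitOn on '\n' = a simple structural split ----
def mySplit : List Char → List (List Char)
  | [] => [[]]
  | c :: rest => if c = '\n' then [] :: mySplit rest else (mySplit rest).modifyHead (c :: ·)

theorem splitOn_go_newline (fuel : Nat) (l cur : List Char) (acc : List (List Char))
    (h : l.length ≤ fuel) :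
    PySem.Chars.splitOn.go ['\n'] fuel l cur acc
      = acc.reverse ++ (mySplit l).modifyHead (cur.reverse ++ ·) := by
  induction fuel generalizing l cur acc with
  | zero =>
    have : l = [] := by cases l <;> simp_all
    subst this
    simp [PySem.Chars.splitOn.go, mySplit]
  | succ fuel ih =>
    cases l with
    | nil => simp [PySem.Chars.splitOn.go, mySplit]
    | cons c rest =>
      simp only [PySem.Chars.splitOn.go]
      by_cases hc : c = '\n'
      · subst hc
        rw [if_pos (by simp)]
        rw [ih _ _ _ (by simpa using h)]
        simp [mySplit]
        cases mySplit rest <;> simp [List.modifyHead]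
      · rw [if_neg (by simp [Ne.symm hc])]
        rw [ih _ _ _ (by simpa using Nat.le_of_succ_le_succ h)]
        simp only [mySplit, if_neg hc]
        cases hms : mySplit rest with
        | nil => simp
        | cons a as => simp [List.modifyHead]

theorem splitOn_newline (cs : List Char) :
    PySem.Chars.splitOn cs ['\n'] = mySplit cs := by
  have := splitOn_go_newline (cs.length + 1) cs [] [] (by omega)
  simp only [PySem.Chars.splitOn] at *
  rw [this]
  cases h : mySplit cs <;> simp [List.modifyHead]

theorem mySplit_ne_nil (cs : List Char) : mySplit cs ≠ [] := by
  induction cs with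
  | nil => simp [mySplit]
  | cons c rest ih =>
    simp only [mySplit]
    split
    · simp
    · cases h : mySplit rest <;> simp_all [List.modifyHead]

theorem mySplit_no_newline (cs : List Char) : ∀ l ∈ mySplit cs, '\n' ∉ l := by
  induction cs with
  | nil => simp [mySplit]
  | cons c rest ih =>
    simp only [mySplit]
    split
    · intro l hl
      rcases List.mem_cons.1 hl with rfl | hl
      · simp
      · exact ih l hl
    · cases h : mySplit rest with
      | nil => simp
      | cons a as =>
        intro l hl
        rcases List.mem_cons.1 hl with rfl | hl
        · have ha := ih a (by simp [h])
          rename_i hc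
          simp [Ne.symm hc, ha]
        · exact ih l (by simp [h, hl])

theorem intercalate_cons_ne_nil (s a : List Char) (L : List (List Char)) (h : L ≠ []) :
    List.intercalate s (a :: L) = a ++ s ++ List.intercalate s L := by
  cases L with
  | nil => simp at h
  | cons b bs => simp [List.intercalate, List.intersperse]

theorem intercalate_mySplit (cs : List Char) : List.intercalate ['\n'] (mySplit cs) = cs := by
  induction cs with
  | nil => simp [mySplit, List.intercalate]
  | cons c rest ih =>
    simp only [mySplit]
    split
    · rw [intercalate_cons_ne_nil _ _ _ (mySplit_ne_nil rest), ih]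
      rename_i hc; simp [hc]
    · cases h : mySplit rest with
      | nil => exact absurd h (mySplit_ne_nil rest)
      | cons a as =>
        rw [h] at ih
        cases as with
        | nil => simp_all [List.intercalate, List.modifyHead]
        | cons b bs =>
          simp only [List.modifyHead]
          rw [intercalate_cons_ne_nil ['\n'] a (b :: bs) (by simp)] at ih
          rw [intercalate_cons_ne_nil ['\n'] (c :: a) (b :: bs) (by simp)]
          simp_all

-- ---- rfind/find specifications ----
theorem rfind_go_spec (s sub : List Char) (j : Nat) :
    (PySem.Chars.rfind.go s sub j = -1 ∧ ∀ i ≤ j, ¬ sub <+: s.drop i) ∨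
    (0 ≤ PySem.Chars.rfind.go s sub j ∧ (PySem.Chars.rfind.go s sub j).toNat ≤ j ∧
      sub <+: s.drop (PySem.Chars.rfind.go s sub j).toNat ∧
      ∀ i, (PySem.Chars.rfind.go s sub j).toNat < i → i ≤ j → ¬ sub <+: s.drop i) := by
  induction j with
  | zero =>
    by_cases h : sub.isPrefixOf s
    · right
      simp only [PySem.Chars.rfind.go, h, if_true]
      refine ⟨le_rfl, le_rfl, by simpa [List.isPrefixOf_iff_prefix] using h, ?_⟩
      intro i hi hij
      omega
    · left
      simp only [PySem.Chars.rfind.go, h, if_false]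
      refine ⟨rfl, ?_⟩
      intro i hi
      interval_cases i
      simpa [List.isPrefixOf_iff_prefix] using h
  | succ j ih =>
    by_cases h : sub.isPrefixOf (s.drop (j + 1))
    · right
      simp only [PySem.Chars.rfind.go, h, if_true]
      refine ⟨by positivity, by simp, by simpa [List.isPrefixOf_iff_prefix] using h, ?_⟩
      intro i hi hij
      omega
    · have hgo : PySem.Chars.rfind.go s sub (j + 1) = PySem.Chars.rfind.go s sub j := by
        simp [PySem.Chars.rfind.go, h]
      have hnp : ¬ sub <+: s.drop (j + 1) := by simpa [List.isPrefixOf_iff_prefix] using h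
      rcases ih with ⟨h1, h2⟩ | ⟨h1, h2, h3, h4⟩
      · left
        refine ⟨hgo.trans h1, ?_⟩
        intro i hi
        rcases Nat.lt_or_ge i (j + 1) with hlt | hge
        · exact h2 i (by omega)
        · have : i = j + 1 := by omega
          subst this; exact hnp
      · right
        rw [hgo]
        refine ⟨h1, by omega, h3, ?_⟩
        intro i hi hij
        rcases Nat.lt_or_ge i (j + 1) with hlt | hge
        · exact h4 i hi (by omega)
        · have : i = j + 1 := by omega
          subst this; exact hnp

theorem rfind_eq_of (s sub : List Char) (k : Nat) (hkle : k ≤ s.length) (hk : sub <+: s.drop k)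
    (hmax : ∀ i, k < i → i ≤ s.length → ¬ sub <+: s.drop i) :
    PySem.Chars.rfind s sub = k := by
  rw [PySem.Chars.rfind.eq_def]
  rcases rfind_go_spec s sub s.length with ⟨h1, h2⟩ | ⟨h1, h2, h3, h4⟩
  · exact absurd hk (h2 k hkle)
  · set r := (PySem.Chars.rfind.go s sub s.length).toNat with hr
    have : r = k := by
      rcases Nat.lt_trichotomy r k with h | h | h
      · exact absurd hk (h4 k h hkle)
      · exact h
      · exact absurd h3 (hmax r h h2)
    omega

theorem singleton_prefix_drop (c : Char) (s : List Char) (i : Nat) :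
    [c] <+: s.drop i ↔ s[i]? = some c := by
  constructor
  · rintro ⟨t, ht⟩
    have : (s.drop i)[0]? = some c := by rw [← ht]; rfl
    simpa [List.getElem?_drop] using this
  · intro h
    refine ⟨(s.drop i).tail, ?_⟩
    have : (s.drop i)[0]? = some c := by simpa [List.getElem?_drop] using h
    cases hd : s.drop i with
    | nil => simp [hd] at this
    | cons a t => simp [hd] at this ⊢; exact this.symm

theorem rfind_single_eq_neg_one_iff (c : Char) (s : List Char) :
    PySem.Chars.rfind s [c] = -1 ↔ c ∉ s := by
  rw [PySem.Chars.rfind.eq_def]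
  rcases rfind_go_spec s [c] s.length with ⟨h1, h2⟩ | ⟨h1, h2, h3, h4⟩
  · rw [h1]
    simp only [true_iff]
    intro hmem
    obtain ⟨i, hi, hci⟩ := List.mem_iff_getElem.1 hmem
    exact h2 i (by omega) ((singleton_prefix_drop c s i).2 (by simp [List.getElem?_eq_getElem hi, hci]))
  · constructor
    · intro h; omega
    · intro hmem
      exfalso
      exact hmem (by
        have := (singleton_prefix_drop c s _).1 h3
        exact List.mem_of_getElem? this)

theorem infix_iff_prefix_drop (sub s : List Char) :
    sub <:+: s ↔ ∃ i, sub <+: s.drop i := by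
  constructor
  · rintro ⟨p, t, rfl⟩
    exact ⟨p.length, by simp [List.drop_append_of_le_length, List.prefix_append]⟩
  · rintro ⟨i, h⟩
    exact h.isInfix.trans (List.drop_suffix i s).isInfix

theorem prefix_drop_append_newline {sub : List Char} (hnl : '\n' ∉ sub) (hne : sub ≠ [])
    (l b : List Char) (i : Nat) (h : sub <+: (l ++ '\n' :: b).drop i) :
    (i + sub.length ≤ l.length ∧ sub <+: l.drop i) ∨
    (l.length + 1 ≤ i ∧ sub <+: b.drop (i - (l.length + 1))) := by
  rcases Nat.lt_or_ge i (l.length + 1) with hlt | hge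
  · have hi : i ≤ l.length := by omega
    have hdrop : (l ++ '\n' :: b).drop i = l.drop i ++ '\n' :: b :=
      List.drop_append_of_le_length hi
    rw [hdrop] at h
    rcases Nat.lt_or_ge l.length (i + sub.length) with hgt | hle
    · exfalso
      obtain ⟨t, ht⟩ := h
      have hlen : (l.drop i).length = l.length - i := by simp
      have hx : (sub ++ t)[l.length - i]? = some '\n' := by
        rw [ht, List.getElem?_append_right (by omega)]
        simp [hlen]
      rw [List.getElem?_append_left (by omega)] at hx
      exact absurd (List.mem_of_getElem? hx) hnl
    · left
      refine ⟨hle, ?_⟩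
      rw [List.prefix_iff_eq_take] at h ⊢
      rw [List.take_append_of_le_length (by simp; omega)] at h
      exact h
  · right
    refine ⟨hge, ?_⟩
    have hdrop : (l ++ '\n' :: b).drop i = b.drop (i - (l.length + 1)) := by
      have h1 : l ++ '\n' :: b = (l ++ ['\n']) ++ b := by simp
      rw [h1, List.drop_append]
      simp
      omega
    rwa [hdrop] at h

theorem infix_append_newline_iff {sub : List Char} (hnl : '\n' ∉ sub) (hne : sub ≠ [])
    (l b : List Char) : sub <:+: (l ++ '\n' :: b) ↔ sub <:+: l ∨ sub <:+: b := by
  constructor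
  · intro h
    obtain ⟨i, hp⟩ := (infix_iff_prefix_drop sub _).1 h
    rcases prefix_drop_append_newline hnl hne l b i hp with ⟨_, hp'⟩ | ⟨_, hp'⟩
    · exact Or.inl ((infix_iff_prefix_drop sub l).2 ⟨i, hp'⟩)
    · exact Or.inr ((infix_iff_prefix_drop sub b).2 ⟨_, hp'⟩)
  · intro h
    rcases h with h | h
    · exact h.trans ⟨[], '\n' :: b, by simp⟩
    · exact h.trans ⟨l ++ ['\n'], [], by simp⟩

theorem find_eq_of (s sub : List Char) (k : Nat) (hk : sub <+: s.drop k)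
    (hmin : ∀ i < k, ¬ sub <+: s.drop i) :
    PySem.Chars.find s sub = k := by
  have hinf : sub <:+: s := (infix_iff_prefix_drop sub s).2 ⟨k, hk⟩
  have hpos : 0 ≤ PySem.Chars.find s sub := (PySem.Chars.find_nonneg_iff _ _).2 hinf
  obtain ⟨h1, h2⟩ := PySem.Chars.find_spec hpos
  set p := (PySem.Chars.find s sub).toNat with hp
  have : p = k := by
    rcases Nat.lt_trichotomy p k with h | h | h
    · exact absurd h1 (hmin p h)
    · exact h
    · exact absurd hk (h2 k h)
  omega

theorem find_append_newline_left {sub : List Char} (hnl : '\n' ∉ sub) (hne : sub ≠ [])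
    (l b : List Char) (h : sub <:+: l) :
    PySem.Chars.find (l ++ '\n' :: b) sub = PySem.Chars.find l sub := by
  have hpos : 0 ≤ PySem.Chars.find l sub := (PySem.Chars.find_nonneg_iff _ _).2 h
  obtain ⟨h1, h2⟩ := PySem.Chars.find_spec hpos
  set p := (PySem.Chars.find l sub).toNat with hp
  have hple : p ≤ l.length := by
    have := PySem.Chars.find_le_length (s := l) (sub := sub)
    omega
  have hres : PySem.Chars.find (l ++ '\n' :: b) sub = p := by
    apply find_eq_of
    · rw [List.drop_append_of_le_length hple]
      exact h1.trans (List.prefix_append _ _)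
    · intro i hi hpre
      rcases prefix_drop_append_newline hnl hne l b i hpre with ⟨_, hp'⟩ | ⟨hge, _⟩
      · exact h2 i hi hp'
      · omega
  rw [hres]; omega

theorem find_append_newline_right {sub : List Char} (hnl : '\n' ∉ sub) (hne : sub ≠ [])
    (l b : List Char) (h1 : ¬ sub <:+: l) (h2 : sub <:+: b) :
    PySem.Chars.find (l ++ '\n' :: b) sub = l.length + 1 + PySem.Chars.find b sub := by
  have hpos : 0 ≤ PySem.Chars.find b sub := (PySem.Chars.find_nonneg_iff _ _).2 h2
  obtain ⟨hb1, hb2⟩ := PySem.Chars.find_spec hpos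
  set p := (PySem.Chars.find b sub).toNat with hp
  have hres : PySem.Chars.find (l ++ '\n' :: b) sub = (l.length + 1 + p : Nat) := by
    apply find_eq_of
    · have : (l ++ '\n' :: b).drop (l.length + 1 + p) = b.drop p := by
        have h1 : l ++ '\n' :: b = (l ++ ['\n']) ++ b := by simp
        rw [h1, List.drop_append]
        simp
      rw [this]; exact hb1
    · intro i hi hpre
      rcases prefix_drop_append_newline hnl hne l b i hpre with ⟨_, hp'⟩ | ⟨hge, hp'⟩
      · exact h1 ((infix_iff_prefix_drop sub l).2 ⟨i, hp'⟩)
      · exact hb2 (i - (l.length + 1)) (by omega) hp'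
  rw [hres]; push_cast; omega

theorem rfind_spec_pos (s sub : List Char) (h : PySem.Chars.rfind s sub ≠ -1) :
    0 ≤ PySem.Chars.rfind s sub ∧ (PySem.Chars.rfind s sub).toNat ≤ s.length ∧
      sub <+: s.drop (PySem.Chars.rfind s sub).toNat ∧
      ∀ i, (PySem.Chars.rfind s sub).toNat < i → i ≤ s.length → ¬ sub <+: s.drop i := by
  rw [PySem.Chars.rfind.eq_def] at h ⊢
  rcases rfind_go_spec s sub s.length with ⟨h1, _⟩ | ⟨h1, h2, h3, h4⟩
  · exact absurd h1 h
  · exact ⟨h1, h2, h3, h4⟩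

theorem rfind_newline_append (l b : List Char) :
    PySem.Chars.rfind (l ++ '\n' :: b) ['\n'] =
      if '\n' ∈ b then l.length + 1 + PySem.Chars.rfind b ['\n'] else l.length := by
  have hsplit : ∀ i : Nat, l.length + 1 ≤ i → (l ++ '\n' :: b).drop i = b.drop (i - (l.length + 1)) := by
    intro i hi
    have h1 : l ++ '\n' :: b = (l ++ ['\n']) ++ b := by simp
    rw [h1, List.drop_append]
    simp
    omega
  by_cases hb : '\n' ∈ b
  · rw [if_pos hb]
    have hneg : PySem.Chars.rfind b ['\n'] ≠ -1 := by
      rw [Ne, rfind_single_eq_neg_one_iff]; simpa using hb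
    obtain ⟨h1, h2, h3, h4⟩ := rfind_spec_pos b ['\n'] hneg
    set r := (PySem.Chars.rfind b ['\n']).toNat with hr
    have : PySem.Chars.rfind (l ++ '\n' :: b) ['\n'] = (l.length + 1 + r : Nat) := by
      apply rfind_eq_of _ _ _ (by simp; omega)
      · rw [hsplit _ (by omega)]
        simpa using h3
      · intro i hi hile hpre
        rw [hsplit _ (by omega)] at hpre
        exact h4 (i - (l.length + 1)) (by omega) (by simp at hile; omega) hpre
    rw [this]; push_cast; omega
  · rw [if_neg hb]
    have : PySem.Chars.rfind (l ++ '\n' :: b) ['\n'] = (l.length : Nat) := by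
      apply rfind_eq_of _ _ _ (by simp)
      · rw [List.drop_append_of_le_length le_rfl]
        simp
      · intro i hi hile hpre
        rw [hsplit _ (by omega)] at hpre
        exact hb (List.mem_of_getElem? ((singleton_prefix_drop _ _ _).1 hpre))
    rw [this]
  
-- ---- the intercalated line list ----
theorem intercalate_take_drop (L : List (List Char)) (n : Nat) (h0 : 0 < n) (hn : n < L.length) :
    List.intercalate ['\n'] L =
      List.intercalate ['\n'] (L.take n) ++ '\n' :: List.intercalate ['\n'] (L.drop n) := by
  induction L generalizing n with
  | nil => simp at hn
  | cons a ls ih =>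
    cases n with
    | zero => omega
    | succ m =>
      cases Nat.eq_zero_or_pos m with
      | inl hm =>
        subst hm
        have hls : ls ≠ [] := by
          intro h; rw [h] at hn; simp at hn
        rw [intercalate_cons_ne_nil _ _ _ hls]
        simp [List.intercalate]
      | inr hm =>
        have hmlt : m < ls.length := by simp [List.length_cons] at hn; omega
        have hls : ls ≠ [] := by intro h; rw [h] at hmlt; simp at hmlt
        have htake : ls.take m ≠ [] := by
          intro hcon
          have hlen := congrArg List.length hcon
          simp [List.length_take] at hlen
          rcases hlen with h | h
          · omega
          · exact hls h
        rw [intercalate_cons_ne_nil _ _ _ hls, ih m hm hmlt]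
        simp only [List.take_succ_cons, List.drop_succ_cons]
        rw [intercalate_cons_ne_nil _ _ _ htake]
        simp

theorem infix_intercalate_iff {sub : List Char} (hnl : '\n' ∉ sub) (hne : sub ≠ [])
    (L : List (List Char)) :
    sub <:+: List.intercalate ['\n'] L ↔ ∃ l ∈ L, sub <:+: l := by
  induction L with
  | nil =>
    simp [List.intercalate]
    intro h
    exact hne h
  | cons a ls ih =>
    cases ls with
    | nil => simp [List.intercalate]
    | cons b bs =>
      rw [intercalate_cons_ne_nil _ _ _ (by simp)]
      have : a ++ ['\n'] ++ List.intercalate ['\n'] (b :: bs) = a ++ '\n' :: List.intercalate ['\n'] (b :: bs) := by simp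
      rw [this, infix_append_newline_iff hnl hne, ih]
      simp

-- ---- the key lemma: position of the last newline before the first occurrence ----
theorem q_lemma {sub : List Char} (hnl : '\n' ∉ sub) (hne : sub ≠ [])
    (L : List (List Char)) (hL : L ≠ []) (hfree : ∀ l ∈ L, '\n' ∉ l)
    (hfound : sub <:+: List.intercalate ['\n'] L) :
    PySem.Chars.rfind
        (List.take (PySem.Chars.find (List.intercalate ['\n'] L) sub).toNat
          (List.intercalate ['\n'] L)) ['\n'] =
      if L.findIdx (fun l => PySem.Chars.isIn sub l) = 0 then -1
      else ((List.intercalate ['\n'] (L.take (L.findIdx (fun l => PySem.Chars.isIn sub l)))).length : Int) := by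
  induction L with
  | nil => simp at hL
  | cons l ls ih =>
    by_cases hl : PySem.Chars.isIn sub l = true
    · -- the first line already contains sub: no newline before the first occurrence
      have hinf : sub <:+: l := (PySem.Chars.isIn_iff_infix _ _).1 hl
      have hidx : (l :: ls).findIdx (fun l => PySem.Chars.isIn sub l) = 0 := by
        simp [List.findIdx_cons, hl]
      rw [hidx, if_pos rfl]
      have hfl : PySem.Chars.find (List.intercalate ['\n'] (l :: ls)) sub = PySem.Chars.find l sub := by
        cases ls with
        | nil => simp [List.intercalate]
        | cons b bs =>
          rw [intercalate_cons_ne_nil _ _ _ (by simp)]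
          have : l ++ ['\n'] ++ List.intercalate ['\n'] (b :: bs) = l ++ '\n' :: List.intercalate ['\n'] (b :: bs) := by simp
          rw [this, find_append_newline_left hnl hne _ _ hinf]
      rw [hfl]
      have hple : (PySem.Chars.find l sub).toNat ≤ l.length := by
        have := PySem.Chars.find_le_length (s := l) (sub := sub)
        omega
      have htake : List.take (PySem.Chars.find l sub).toNat (List.intercalate ['\n'] (l :: ls))
          = List.take (PySem.Chars.find l sub).toNat l := by
        cases ls with
        | nil => simp [List.intercalate]
        | cons b bs =>
          rw [intercalate_cons_ne_nil _ _ _ (by simp)]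
          rw [List.append_assoc, List.take_append_of_le_length hple]
      rw [htake, rfind_single_eq_neg_one_iff]
      intro hmem
      exact hfree l (by simp) (List.mem_of_mem_take hmem)
    · -- sub is not in the first line
      have hls : ls ≠ [] := by
        intro h
        subst h
        simp [List.intercalate] at hfound
        exact hl ((PySem.Chars.isIn_iff_infix _ _).2 hfound)
      have hcs : List.intercalate ['\n'] (l :: ls) = l ++ '\n' :: List.intercalate ['\n'] ls := by
        rw [intercalate_cons_ne_nil _ _ _ hls]; simp
      have hninf : ¬ sub <:+: l := fun h => hl ((PySem.Chars.isIn_iff_infix _ _).2 h)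
      have hfound' : sub <:+: List.intercalate ['\n'] ls := by
        rw [hcs, infix_append_newline_iff hnl hne] at hfound
        tauto
      have hfl : PySem.Chars.find (List.intercalate ['\n'] (l :: ls)) sub
          = l.length + 1 + PySem.Chars.find (List.intercalate ['\n'] ls) sub := by
        rw [hcs, find_append_newline_right hnl hne _ _ hninf hfound']
      have hfpos : 0 ≤ PySem.Chars.find (List.intercalate ['\n'] ls) sub :=
        (PySem.Chars.find_nonneg_iff _ _).2 hfound'
      set p' := (PySem.Chars.find (List.intercalate ['\n'] ls) sub).toNat with hp'
      have hptoNat : (PySem.Chars.find (List.intercalate ['\n'] (l :: ls)) sub).toNat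
          = l.length + 1 + p' := by rw [hfl]; omega
      have hp'le : p' ≤ (List.intercalate ['\n'] ls).length := by
        have := PySem.Chars.find_le_length (s := List.intercalate ['\n'] ls) (sub := sub)
        omega
      have htake : List.take (l.length + 1 + p') (List.intercalate ['\n'] (l :: ls))
          = l ++ '\n' :: List.take p' (List.intercalate ['\n'] ls) := by
        rw [hcs]
        have h1 : l.length + 1 + p' = l.length + (p' + 1) := by omega
        rw [h1, List.take_append]
        simp [List.take_succ_cons]
      have hidx : (l :: ls).findIdx (fun l => PySem.Chars.isIn sub l)
          = ls.findIdx (fun l => PySem.Chars.isIn sub l) + 1 := by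
        simp [List.findIdx_cons, hl]
      have ihq := ih hls (fun x hx => hfree x (by simp [hx])) hfound'
      set idx' := ls.findIdx (fun l => PySem.Chars.isIn sub l) with hidx'
      rw [hptoNat, htake, rfind_newline_append, hidx]
      by_cases hz : idx' = 0
      · rw [hz] at ihq
        rw [if_pos rfl] at ihq
        have hnomem : '\n' ∉ List.take p' (List.intercalate ['\n'] ls) := by
          rw [← rfind_single_eq_neg_one_iff]
          exact ihq
        rw [if_neg hnomem, if_neg (by omega), hz]
        simp [List.intercalate]
      · rw [if_neg hz] at ihq
        have hmem : '\n' ∈ List.take p' (List.intercalate ['\n'] ls) := by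
          by_contra hno
          rw [← rfind_single_eq_neg_one_iff] at hno
          rw [hno] at ihq
          have : (0:Int) ≤ (List.intercalate ['\n'] (ls.take idx')).length := by positivity
          omega
        rw [if_pos hmem, if_neg (by omega)]
        have htkne : ls.take idx' ≠ [] := by
          have hlp : 0 < ls.length := List.length_pos_of_ne_nil hls
          intro hcon
          have hlen := congrArg List.length hcon
          simp [List.length_take] at hlen
          rcases hlen with h | h
          · exact hz h
          · exact hls h
        have : List.take (idx' + 1) (l :: ls) = l :: ls.take idx' := by simp
        rw [this, intercalate_cons_ne_nil _ _ _ htkne]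
        rw [ihq]
        push_cast
        simp
        omega

theorem intercalate_nil' (s : List Char) : List.intercalate s [] = [] := by
  simp [List.intercalate]

-- ===== VERDICT (by name: the statement is the Claim_ definition above) =====
theorem separate_meta_spec : Claim_equal_separate_meta := by
  intro text _
  unfold Spec_separate_meta separate_meta separate_meta_alt
  have hnl : '\n' ∉ "<body>".toList := by decide
  have hne : "<body>".toList ≠ [] := by decide
  have hNL : "\n".toList = ['\n'] := rfl
  simp only [hNL]
  rcases sepMeta_loop_zero (PySem.Chars.splitOn text.toList ['\n']) [] [] with ⟨h1, h2⟩
  simp only [h1, h2, List.nil_append]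
  rw [splitOn_newline]
  set cs := text.toList with hcs
  set L := mySplit cs with hLdef
  set idx := L.findIdx (fun l => PySem.Chars.isIn "<body>".toList l) with hidxdef
  have hI : List.intercalate ['\n'] L = cs := intercalate_mySplit cs
  have hjoin : PySem.Chars.join ['\n'] = List.intercalate ['\n'] := rfl
  simp only [PySem.Str.find_eq, ← hcs, hjoin]
  by_cases hin : "<body>".toList <:+: cs
  · -- '<body>' occurs somewhere: A cuts at the first line containing it,
    -- B at the last newline before its first occurrence
    have hfne : PySem.Chars.find cs "<body>".toList ≠ -1 :=
      (PySem.Chars.find_ne_neg_one_iff _ _).2 hin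
    have hfpos : 0 ≤ PySem.Chars.find cs "<body>".toList :=
      (PySem.Chars.find_nonneg_iff _ _).2 hin
    have hflen : PySem.Chars.find cs "<body>".toList ≤ cs.length :=
      PySem.Chars.find_le_length cs "<body>".toList
    rw [if_neg (by simpa using hfne)]
    set f := PySem.Chars.find cs "<body>".toList with hf
    set q := PySem.Chars.rfind (List.take f.toNat cs) ['\n'] with hqdef
    set J := List.intercalate ['\n'] (L.take idx) with hJ
    set D := List.intercalate ['\n'] (L.drop idx) with hD
    have hq : q = if idx = 0 then -1 else (J.length : Int) := by
      have := q_lemma hnl hne L (mySplit_ne_nil cs) (mySplit_no_newline cs) (by rwa [hI])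
      rw [hI] at this
      exact this
    have hcut : PySem.Str.rfindFrom text "\n" 0 (some f) = if q = -1 then -1 else q := by
      rw [PySem.Str.rfindFrom_eq, hNL, ← hcs]
      have c1 : ¬ ((cs.length : Int) < f) := not_lt.2 hflen
      have c2 : ¬ (f < (0 : Int)) := not_lt.2 hfpos
      simp only [PySem.Chars.rfindFrom, c1, c2, if_false]
      norm_num
      rw [if_neg c2]
    rw [hcut]
    by_cases hz : idx = 0
    · -- the very first line contains '<body>': metadata is empty
      have hqm : q = -1 := by rw [hq, if_pos hz]
      rw [hqm, if_pos rfl, if_pos (by decide), hJ, hD, hz]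
      simp [hI, hcs, String.ofList_toList, intercalate_nil']
    · -- B's cut index is exactly the length of A's metadata
      have hidxpos : 0 < idx := Nat.pos_of_ne_zero hz
      have hidxlt : idx < L.length := by
        rw [hidxdef]
        apply List.findIdx_lt_length.2
        obtain ⟨x, hx, hxinf⟩ := (infix_intercalate_iff hnl hne L).1 (by rwa [hI])
        exact ⟨x, hx, (PySem.Chars.isIn_iff_infix _ _).2 hxinf⟩
      have hsplitL : cs = J ++ '\n' :: D := by
        rw [← hI]; exact intercalate_take_drop L idx hidxpos hidxlt
      have hqval : q = (J.length : Int) := by rw [hq, if_neg hz]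
      have hqne : ¬ (q = -1) := by rw [hqval]; omega
      rw [if_neg hqne, hqval]
      rw [if_neg (by simp)]
      have hmeta : (PySem.Str.slice text none (some (J.length : Int))).toList = J := by
        rw [PySem.Str.toList_slice, PySem.Chars.slice_eq_listSlice, ← hcs,
          PySem.List.slice_to_natCast, hsplitL, List.take_left]
      have hdata : (PySem.Str.slice text (some ((J.length : Int) + 1)) none).toList = D := by
        rw [PySem.Str.toList_slice, PySem.Chars.slice_eq_listSlice, ← hcs]
        have hc : (J.length : Int) + 1 = ((J.length + 1 : Nat) : Int) := by push_cast; ring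
        rw [hc, PySem.List.slice_from_natCast, hsplitL]
        have harr : J ++ '\n' :: D = (J ++ ['\n']) ++ D := by simp
        rw [harr, List.drop_append]
        simp
      have e1 : PySem.Str.slice text none (some (J.length : Int)) = String.ofList J :=
        String.toList_inj.1 (hmeta.trans String.toList_ofList.symm)
      have e2 : PySem.Str.slice text (some ((J.length : Int) + 1)) none = String.ofList D :=
        String.toList_inj.1 (hdata.trans String.toList_ofList.symm)
      rw [e1, e2]
  · -- no occurrence: everything is metadata
    have hfneg : PySem.Chars.find cs "<body>".toList = -1 :=
      (PySem.Chars.find_eq_neg_one_iff _ _).2 hin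
    rw [hfneg]
    rw [if_pos (by decide)]
    have hidx : idx = L.length := by
      rw [hidxdef]
      apply List.findIdx_eq_length.2
      intro x hx
      rw [PySem.Chars.isIn_eq_false_iff]
      intro hinf
      exact hin (by rw [← hI]; exact (infix_intercalate_iff hnl hne L).2 ⟨x, hx, hinf⟩)
    rw [hidx]
    simp [hI, hcs, String.ofList_toList, intercalate_nil']
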